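-- pv_equiv track=rewrite | github.com/Miyamura80/MCP-Template | api_server/auth/scopes.py | check_scopes
-- ===== SOURCE A (Python) =====
-- def check_scopes(required: list[str], granted: list[str] | None) -> bool:
--     """Check whether *granted* scopes satisfy all *required* scopes.
--
--     ``None`` means legacy key with no scope restrictions (allow all).
--     Supports wildcards: ``*`` (everything) and ``resource:*`` (all in resource).
--
--     Note: wildcard matching is one-directional. A *granted* wildcard
--     (e.g. ``services:*``) satisfies any concrete required scope in
--     that resource. However, a *required* wildcard (e.g. ``services:*``)
--     is only satisfied by an exact ``services:*`` or ``*`` in the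
--     granted list -- not by having all concrete ``services:`` scopes
--     individually granted. This is intentional: ``require_scopes``
--     always uses concrete scope names, never wildcards.
--     """
--     if granted is None:
--         return True  # Legacy key - no restrictions
--     if "*" in granted:
--         return True
--     for req in required:
--         parts = req.split(":")
--         resource_wildcard = f"{parts[0]}:*" if len(parts) > 1 else None
--         if req not in granted and (
--             resource_wildcard is None or resource_wildcard not in granted
--         ):
--             return False
--     return True
-- ===== SOURCE B (Python) =====
-- def check_scopes(required, granted):
--     """Inverse traversal: instead of testing each required scope against the
--     granted list, fold over the granted scopes, removing from a 'remaining'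
--     set every required scope each grant covers; satisfied iff nothing remains."""
--     if granted is None:
--         return True
--     remaining = set(required)
--     for g in granted:
--         if g == "*":
--             return True
--         if g.endswith(":*") and ":" not in g[:-2]:
--             prefix = g[:-1]
--             remaining = {r for r in remaining if not r.startswith(prefix)}
--         else:
--             remaining.discard(g)
--     return not remaining
-- ===== Notes on version B (the rewrite author's own statement) =====
-- stated objective: alternative
-- what changed: B inverts the traversal: instead of A's loop over required scopes that rescans granted for each one, B folds once over the granted list, removing from a set of remaining required scopes everything each grant covers (exactly, or by prefix for a 'resource:*' wildcard with a colon-free resource), and succeeds iff the set is empty at the end.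
import Mathlib
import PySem

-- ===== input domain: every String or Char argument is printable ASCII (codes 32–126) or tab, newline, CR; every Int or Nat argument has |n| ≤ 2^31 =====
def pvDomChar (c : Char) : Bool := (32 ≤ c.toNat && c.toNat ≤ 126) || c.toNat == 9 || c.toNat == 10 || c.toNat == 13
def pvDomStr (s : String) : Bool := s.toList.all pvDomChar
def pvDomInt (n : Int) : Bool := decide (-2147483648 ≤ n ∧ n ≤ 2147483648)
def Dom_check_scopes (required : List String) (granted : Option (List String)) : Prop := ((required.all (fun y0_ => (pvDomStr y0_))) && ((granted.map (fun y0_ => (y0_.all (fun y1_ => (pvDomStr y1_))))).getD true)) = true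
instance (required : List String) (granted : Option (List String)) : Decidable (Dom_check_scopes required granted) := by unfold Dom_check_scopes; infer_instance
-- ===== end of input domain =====

-- B traverses the GRANTED list once, removing from a set of remaining required scopes
-- everything each grant covers (exactly or as a resource wildcard), instead of A's
-- per-required rescan of granted; the return value is proved equal on all inputs.


-- ===== PORT A =====
-- the 'for req in required' loop: returns False on the first unsatisfied scope
def check_scopes_loop (g : List String) : List String → Bool
  | [] => true
  | req :: rest =>
    let parts := (PySem.Str.split? req ":").getD []      -- req.split(":"); sep ≠ "" so split? is some
    let resource_wildcard : Option String :=
      if 1 < parts.length then some (parts.getD 0 "" ++ ":*") else none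
    if !(g.contains req) &&
        (match resource_wildcard with
         | none => true
         | some w => !(g.contains w)) then false
    else check_scopes_loop g rest

def check_scopes (required : List String) (granted : Option (List String)) : Bool :=
  match granted with
  | none => true
  | some g => if g.contains "*" then true else check_scopes_loop g required

-- ===== PORT B =====
-- the 'for g in granted' loop of Source B, carrying the set of still-unsatisfied required
-- scopes; ':' in g[:-2] is ported as the char-containment test (exact: the needle ":" is
-- a single character); the final 'not remaining' is the emptiness of the set
def check_scopes_alt_loop (remaining : PySem.Set String) : List String → Bool
  | [] => remaining.isEmpty
  | g :: gs =>
    if g == "*" then true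
    else if PySem.Str.endswith g ":*" && !(PySem.Str.isIn ":" (PySem.Str.slice g none (some (-2)))) then
      check_scopes_alt_loop
        (List.filter (fun r => !(PySem.Str.startswith r (PySem.Str.slice g none (some (-1))))) remaining) gs
    else
      check_scopes_alt_loop (PySem.Set.discard remaining g) gs

def check_scopes_alt (required : List String) (granted : Option (List String)) : Bool :=
  match granted with
  | none => true
  | some g => check_scopes_alt_loop (PySem.Set.ofList required) g

-- ===== PRECONDITION & SPEC =====
def Spec_check_scopes (required : List String) (granted : Option (List String)) (out : Bool) : Prop := out = check_scopes_alt required granted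
instance (required : List String) (granted : Option (List String)) (out : Bool) : Decidable (Spec_check_scopes required granted out) := by unfold Spec_check_scopes; infer_instance

-- ===== CLAIM (what is proved, stated in full; the proofs are below) =====
def Claim_equal_check_scopes : Prop := ∀ (required : List String) (granted : Option (List String)), Dom_check_scopes required granted → Spec_check_scopes required granted (check_scopes required granted)

-- ===== LEMMAS AND PROOFS =====

-- (prefix of l before the first ':', whether ':' occurs in l)
def pvPartitionColon : List Char → List Char × Bool
  | [] => ([], false)
  | c :: rest =>
    if c = ':' then ([], true)
    else
      let p := pvPartitionColon rest
      (c :: p.1, p.2)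

-- reference form of req.split(":") (single-character separator)
def pvSplitColon : List Char → List (List Char)
  | [] => [[]]
  | c :: rest =>
    if c = ':' then [] :: pvSplitColon rest
    else
      match pvSplitColon rest with
      | [] => [[c]]
      | h :: t => (c :: h) :: t

-- A's per-required satisfaction predicate, in partition terms
def pvSat (G : List String) (r : String) : Bool :=
  G.contains r ||
    ((pvPartitionColon r.toList).2 &&
      G.contains (String.ofList ((pvPartitionColon r.toList).1 ++ [':', '*'])))

-- B's per-grant tests
def pvWild (g : String) : Bool :=
  PySem.Str.endswith g ":*" && !(PySem.Str.isIn ":" (PySem.Str.slice g none (some (-2))))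

def pvCovers (g r : String) : Bool :=
  if pvWild g then PySem.Str.startswith r (PySem.Str.slice g none (some (-1))) else r == g

theorem pvSplitColon_ne_nil (l : List Char) : pvSplitColon l ≠ [] := by
  cases l with
  | nil => simp [pvSplitColon]
  | cons c rest =>
    simp only [pvSplitColon]
    split
    · simp
    · split <;> simp

theorem splitOn_go_colon (fuel : Nat) :
    ∀ (l cur : List Char) (acc : List (List Char)), l.length < fuel →
      PySem.Chars.splitOn.go [':'] fuel l cur acc =
        acc.reverse ++
          (match pvSplitColon l with
           | [] => []
           | h :: t => (cur.reverse ++ h) :: t) := by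
  induction fuel with
  | zero => intro l cur acc h; omega
  | succ n ih =>
    intro l cur acc h
    cases l with
    | nil => simp [PySem.Chars.splitOn.go, pvSplitColon]
    | cons c rest =>
      by_cases hc : c = ':'
      · subst hc
        have hpre : [':'].isPrefixOf (':' :: rest) = true := by simp [List.isPrefixOf]
        rw [PySem.Chars.splitOn.go, if_pos hpre]
        simp only [List.length_cons, List.length_nil, List.drop_succ_cons, List.drop_zero,
          Nat.zero_add]
        simp only [List.length_cons] at h
        rw [ih rest [] ((List.reverse cur) :: acc) (by omega)]
        simp only [pvSplitColon, if_pos]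
        cases hrest : pvSplitColon rest with
        | nil => exact absurd hrest (pvSplitColon_ne_nil rest)
        | cons h0 t0 => simp
      · have hpre : [':'].isPrefixOf (c :: rest) = false := by
          simp [List.isPrefixOf]
          intro hco; exact absurd hco.symm hc
        rw [PySem.Chars.splitOn.go, if_neg (by simp [hpre])]
        simp only [List.length_cons] at h
        rw [ih rest (c :: cur) acc (by omega)]
        simp only [pvSplitColon, if_neg hc]
        cases hrest : pvSplitColon rest with
        | nil => exact absurd hrest (pvSplitColon_ne_nil rest)
        | cons h0 t0 => simp

theorem splitOn_colon (l : List Char) :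
    PySem.Chars.splitOn l [':'] = pvSplitColon l := by
  rw [PySem.Chars.splitOn, splitOn_go_colon (l.length + 1) l [] [] (by omega)]
  cases hl : pvSplitColon l with
  | nil => exact absurd hl (pvSplitColon_ne_nil l)
  | cons h t => simp

theorem partition_snd_iff (l : List Char) :
    (pvPartitionColon l).2 = true ↔ 1 < (pvSplitColon l).length := by
  induction l with
  | nil => simp [pvPartitionColon, pvSplitColon]
  | cons c rest ih =>
    by_cases hc : c = ':'
    · subst hc
      simp only [pvPartitionColon, pvSplitColon, if_pos]
      cases hrest : pvSplitColon rest with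
      | nil => exact absurd hrest (pvSplitColon_ne_nil rest)
      | cons h t => simp
    · simp only [pvPartitionColon, pvSplitColon, if_neg hc]
      cases hrest : pvSplitColon rest with
      | nil => exact absurd hrest (pvSplitColon_ne_nil rest)
      | cons h t =>
        rw [hrest] at ih
        simpa using ih

theorem partition_fst_eq (l : List Char) :
    (pvSplitColon l).headD [] = (pvPartitionColon l).1 := by
  induction l with
  | nil => simp [pvPartitionColon, pvSplitColon]
  | cons c rest ih =>
    by_cases hc : c = ':'
    · subst hc; simp [pvPartitionColon, pvSplitColon]
    · simp only [pvPartitionColon, pvSplitColon, if_neg hc]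
      cases hrest : pvSplitColon rest with
      | nil => exact absurd hrest (pvSplitColon_ne_nil rest)
      | cons h t =>
        rw [hrest] at ih
        simpa using ih

theorem partition_no_colon (l : List Char) : ':' ∉ (pvPartitionColon l).1 := by
  induction l with
  | nil => simp [pvPartitionColon]
  | cons c rest ih =>
    by_cases hc : c = ':'
    · subst hc; simp [pvPartitionColon]
    · simp only [pvPartitionColon, if_neg hc]
      simp only [List.mem_cons, not_or]
      exact ⟨fun h => hc h.symm, ih⟩

theorem partition_true_decomp (l : List Char) (h : (pvPartitionColon l).2 = true) :
    ∃ rest, l = (pvPartitionColon l).1 ++ ':' :: rest := by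
  induction l with
  | nil => simp [pvPartitionColon] at h
  | cons c rest ih =>
    by_cases hc : c = ':'
    · subst hc; exact ⟨rest, by simp [pvPartitionColon]⟩
    · simp only [pvPartitionColon, if_neg hc] at h ⊢
      obtain ⟨r, hr⟩ := ih h
      refine ⟨r, ?_⟩
      conv_lhs => rw [hr]
      simp

theorem partition_of_prefix (pre rest : List Char) (h : ':' ∉ pre) :
    pvPartitionColon (pre ++ ':' :: rest) = (pre, true) := by
  induction pre with
  | nil => simp [pvPartitionColon]
  | cons c p ih =>
    simp only [List.mem_cons, not_or] at h
    have hc : ¬ c = ':' := fun hcc => h.1 hcc.symm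
    simp only [List.cons_append, pvPartitionColon, if_neg hc, ih h.2]

theorem singleton_infix_iff (c : Char) (l : List Char) : [c] <:+: l ↔ c ∈ l := by
  constructor
  · intro h
    exact List.singleton_sublist.mp h.sublist
  · intro h
    obtain ⟨s, t, hst⟩ := List.append_of_mem h
    exact ⟨s, t, by simp [hst]⟩

-- B's wildcard test decomposes the grant as 'resource:*' with a colon-free resource
theorem wild_decomp (g : String) (h : pvWild g = true) :
    ∃ pre : List Char, g.toList = pre ++ [':', '*'] ∧ ':' ∉ pre := by
  rw [pvWild, Bool.and_eq_true, Bool.not_eq_true'] at h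
  obtain ⟨he, hi⟩ := h
  have hsuf : (":*").toList <:+ g.toList := by
    rw [PySem.Str.endswith_eq, PySem.Chars.endswith_iff] at he
    exact he
  obtain ⟨u, hu⟩ := hsuf
  refine ⟨u, by simpa using hu.symm, ?_⟩
  intro hmem
  have hslice : (PySem.Str.slice g none (some (-2))).toList = u := by
    rw [PySem.Str.toList_slice, PySem.Chars.slice_eq_listSlice,
        PySem.List.slice_to_neg_ofNat g.toList 2 (by omega), ← hu]
    simp
  have : PySem.Str.isIn ":" (PySem.Str.slice g none (some (-2))) = true := by
    rw [PySem.Str.isIn_iff_infix, hslice]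
    exact (singleton_infix_iff ':' u).mpr hmem
  rw [this] at hi
  exact absurd hi (by simp)

-- g[:-1] on the character level
theorem slice_neg_one_toList (g : String) :
    (PySem.Str.slice g none (some (-1))).toList = g.toList.dropLast := by
  rw [PySem.Str.toList_slice, PySem.Chars.slice_eq_listSlice, PySem.List.slice_to_neg_one]

theorem covers_self (g : String) : pvCovers g g = true := by
  rw [pvCovers]
  split
  · rw [PySem.Str.startswith_eq, PySem.Chars.startswith_iff, slice_neg_one_toList]
    exact List.dropLast_prefix g.toList
  · simp

-- the key bridge: some granted scope covers r (B) ⟺ r is satisfied (A)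
theorem covers_exists_iff (G : List String) (r : String) :
    G.any (fun g => pvCovers g r) = pvSat G r := by
  rw [Bool.eq_iff_iff, List.any_eq_true, pvSat]
  simp only [Bool.or_eq_true, Bool.and_eq_true, List.contains_iff_mem]
  constructor
  · rintro ⟨g, hg, hcov⟩
    rw [pvCovers] at hcov
    by_cases hw : pvWild g = true
    · rw [if_pos hw] at hcov
      obtain ⟨pre, hgl, hpre⟩ := wild_decomp g hw
      right
      have hstart : (pre ++ [':']) <+: r.toList := by
        rw [PySem.Str.startswith_eq, PySem.Chars.startswith_iff, slice_neg_one_toList, hgl] at hcov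
        simpa using hcov
      obtain ⟨t, ht⟩ := hstart
      have hrl : r.toList = pre ++ ':' :: t := by rw [← ht]; simp
      have hpart : pvPartitionColon r.toList = (pre, true) := by
        rw [hrl]; exact partition_of_prefix pre t hpre
      refine ⟨by rw [hpart], ?_⟩
      have : String.ofList ((pvPartitionColon r.toList).1 ++ [':', '*']) = g := by
        rw [hpart]
        show String.ofList (pre ++ [':', '*']) = g
        rw [← hgl, String.ofList_toList]
      rwa [this]
    · rw [if_neg hw] at hcov
      left
      have : r = g := by simpa using hcov
      rwa [this]
  · rintro (hmem | ⟨hcolon, hmem⟩)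
    · exact ⟨r, hmem, covers_self r⟩
    · refine ⟨_, hmem, ?_⟩
      set w := String.ofList ((pvPartitionColon r.toList).1 ++ [':', '*']) with hw
      have hwl : w.toList = (pvPartitionColon r.toList).1 ++ [':', '*'] := by
        rw [hw, String.toList_ofList]
      have hwild : pvWild w = true := by
        rw [pvWild, Bool.and_eq_true]
        constructor
        · rw [PySem.Str.endswith_eq, PySem.Chars.endswith_iff, hwl]
          simp
        · rw [Bool.not_eq_true']
          rw [show (PySem.Str.isIn ":" (PySem.Str.slice w none (some (-2))) = false) ↔
              ¬ (PySem.Str.isIn ":" (PySem.Str.slice w none (some (-2))) = true) from by simp]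
          rw [PySem.Str.isIn_iff_infix]
          have hslice : (PySem.Str.slice w none (some (-2))).toList = (pvPartitionColon r.toList).1 := by
            rw [PySem.Str.toList_slice, PySem.Chars.slice_eq_listSlice,
                PySem.List.slice_to_neg_ofNat w.toList 2 (by omega), hwl]
            simp
          rw [hslice]
          show ¬ (":").toList <:+: (pvPartitionColon r.toList).1
          intro hinf
          exact partition_no_colon r.toList ((singleton_infix_iff ':' _).mp (by simpa using hinf))
      rw [pvCovers, if_pos hwild, PySem.Str.startswith_eq, PySem.Chars.startswith_iff]
      rw [slice_neg_one_toList, hwl]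
      obtain ⟨rest, hr⟩ := partition_true_decomp r.toList hcolon
      refine ⟨rest, ?_⟩
      conv_rhs => rw [hr]
      simp

-- A's step condition is ¬ pvSat
theorem aStep_eq (G : List String) (req : String) :
    (!(G.contains req) &&
      (match (if 1 < ((PySem.Str.split? req ":").getD []).length
              then some ((((PySem.Str.split? req ":").getD []).getD 0 "") ++ ":*") else none : Option String) with
       | none => true
       | some w => !(G.contains w))) = !(pvSat G req) := by
  have hsplit : (PySem.Str.split? req ":").getD [] =
      (pvSplitColon req.toList).map String.ofList := by
    rw [PySem.Str.split?]
    have h1 : PySem.Chars.split? req.toList (":").toList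
        = some (PySem.Chars.splitOn req.toList [':']) := by
      simp [PySem.Chars.split?]
    rw [h1]
    simp [splitOn_colon]
  rw [hsplit, pvSat]
  by_cases hcolon : (pvPartitionColon req.toList).2 = true
  · have hlen : 1 < ((pvSplitColon req.toList).map String.ofList).length := by
      simpa using (partition_snd_iff req.toList).mp hcolon
    rw [if_pos hlen, hcolon]
    have hhead : ((pvSplitColon req.toList).map String.ofList).getD 0 "" =
        String.ofList (pvPartitionColon req.toList).1 := by
      cases hl : pvSplitColon req.toList with
      | nil => exact absurd hl (pvSplitColon_ne_nil req.toList)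
      | cons h t =>
        have hf := partition_fst_eq req.toList
        rw [hl] at hf
        simp at hf
        simp [← hf]
    rw [hhead]
    have happ : String.ofList (pvPartitionColon req.toList).1 ++ ":*" =
        String.ofList ((pvPartitionColon req.toList).1 ++ [':', '*']) := by
      apply String.toList_injective
      rw [String.toList_append]
      simp
    rw [happ]
    generalize String.ofList ((pvPartitionColon req.toList).1 ++ [':', '*']) = w
    cases h1 : G.contains req <;> cases h2 : G.contains w <;> first | rfl | simpa using h2
  · have hcolon' : (pvPartitionColon req.toList).2 = false := by simpa using hcolon
    have hlen : ¬ 1 < ((pvSplitColon req.toList).map String.ofList).length := by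
      rw [List.length_map]
      intro h
      exact hcolon ((partition_snd_iff req.toList).mpr h)
    rw [if_neg hlen, hcolon']
    cases h1 : G.contains req <;> rfl

theorem aLoop_eq (G : List String) (reqs : List String) :
    check_scopes_loop G reqs = reqs.all (pvSat G) := by
  induction reqs with
  | nil => rfl
  | cons req rest ih =>
    simp only [check_scopes_loop, List.all_cons]
    rw [← ih, aStep_eq G req]
    cases h : pvSat G req <;> rfl

theorem bLoop_eq (gs : List String) :
    ∀ rem : List String, check_scopes_alt_loop rem gs =
      (gs.contains "*" ||
        (rem.filter (fun r => !(gs.any (fun g => pvCovers g r)))).isEmpty) := by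
  induction gs with
  | nil =>
    intro rem
    simp [check_scopes_alt_loop, List.filter_true]
  | cons g gs ih =>
    intro rem
    rw [check_scopes_alt_loop]
    by_cases hstar : g == "*"
    · rw [if_pos hstar]
      have : (g :: gs).contains "*" = true := by
        simp only [List.contains_cons]
        simp [show g = "*" from by simpa using hstar]
      rw [this, Bool.true_or]
    · rw [if_neg hstar]
      have hcons : (g :: gs).contains "*" = gs.contains "*" := by
        simp only [List.contains_cons]
        have : ("*" == g) = false := by
          have hne : ¬ g = "*" := by simpa using hstar
          simp [Ne.symm hne]
        rw [this, Bool.false_or]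
      by_cases hw : pvWild g = true
      · rw [if_pos (by rw [← pvWild]; exact hw), ih, hcons, List.filter_filter]
        congr 1
        congr 1
        apply List.filter_congr
        intro r _
        simp only [List.any_cons, pvCovers, if_pos hw, Bool.not_or, Bool.and_comm]
      · rw [if_neg (by rw [← pvWild]; exact hw), ih, hcons]
        show (gs.contains "*" || ((PySem.Set.discard rem g).filter _).isEmpty) = _
        rw [PySem.Set.discard, List.filter_filter]
        congr 1
        congr 1
        apply List.filter_congr
        intro r _
        simp only [List.any_cons, pvCovers, if_neg hw, Bool.not_or, Bool.and_comm]

theorem all_eq_filter_isEmpty (l : List String) (p : String → Bool) :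
    l.all p = ((PySem.Set.ofList l).filter (fun r => !(p r))).isEmpty := by
  rw [Bool.eq_iff_iff, List.all_eq_true, List.isEmpty_iff, List.filter_eq_nil_iff]
  constructor
  · intro h a ha
    have : a ∈ l := (PySem.Set.mem_ofList l a).mp ha
    simp [h a this]
  · intro h a ha
    have := h a ((PySem.Set.mem_ofList l a).mpr ha)
    simpa using this

-- ===== VERDICT (by name: the statement is the Claim_ definition above) =====
theorem check_scopes_spec : Claim_equal_check_scopes := by
  intro required granted _
  unfold Spec_check_scopes
  cases granted with
  | none => rfl
  | some G =>
    show (if G.contains "*" then true else check_scopes_loop G required) = _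
    rw [check_scopes_alt]
    rw [bLoop_eq G (PySem.Set.ofList required)]
    by_cases hstar : G.contains "*" = true
    · rw [if_pos hstar, hstar, Bool.true_or]
    · rw [if_neg hstar, (by simpa using hstar : G.contains "*" = false), Bool.false_or]
      rw [aLoop_eq]
      rw [all_eq_filter_isEmpty required (pvSat G)]
      congr 1
      apply List.filter_congr
      intro r _
      rw [covers_exists_iff]
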